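-- pv_equiv track=rewrite | github.com/enochosbot-bot/enoch-tuning | scripts/content-factory.py | pick_video_from_vidgen_output
-- ===== SOURCE A (Python) =====
-- def pick_video_from_vidgen_output(stdout: str) -> tuple[str | None, str | None]:
--     lines = stdout.splitlines()
--     order = ["kling", "luma", "minimax", "runway"]
--     found: dict[str, str] = {}
--     cur = None
--     for line in lines:
--         if line.startswith("- ") and ":" in line:
--             cur = line.split(":", 1)[0].replace("-", "").strip().lower()
--         if "file:" in line and cur:
--             path = line.split("file:", 1)[1].strip()
--             found[cur] = path
--     for p in order:
--         if p in found:
--             return p, found[p]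
--     return None, None
-- ===== SOURCE B (Python) =====
-- def pick_video_from_vidgen_output(stdout: str) -> tuple[str | None, str | None]:
--     order = ["kling", "luma", "minimax", "runway"]
--     best_rank = len(order)
--     best = (None, None)
--     cur = None
--     for line in stdout.splitlines():
--         if line.startswith("- ") and ":" in line:
--             cur = line.split(":", 1)[0].replace("-", "").strip().lower()
--         if "file:" in line and cur and cur in order:
--             rank = order.index(cur)
--             if rank <= best_rank:
--                 best_rank = rank
--                 best = (cur, line.split("file:", 1)[1].strip())
--     return best
-- ===== Notes on version B (the rewrite author's own statement) =====
-- stated objective: simpler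
-- what changed: Replaced the intermediate provider->path dict plus a second priority scan with a single parsing pass that keeps only the best-ranked (provider, path) seen so far, using a rank sentinel and <= so a later file for the same provider still wins.
import Mathlib
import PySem

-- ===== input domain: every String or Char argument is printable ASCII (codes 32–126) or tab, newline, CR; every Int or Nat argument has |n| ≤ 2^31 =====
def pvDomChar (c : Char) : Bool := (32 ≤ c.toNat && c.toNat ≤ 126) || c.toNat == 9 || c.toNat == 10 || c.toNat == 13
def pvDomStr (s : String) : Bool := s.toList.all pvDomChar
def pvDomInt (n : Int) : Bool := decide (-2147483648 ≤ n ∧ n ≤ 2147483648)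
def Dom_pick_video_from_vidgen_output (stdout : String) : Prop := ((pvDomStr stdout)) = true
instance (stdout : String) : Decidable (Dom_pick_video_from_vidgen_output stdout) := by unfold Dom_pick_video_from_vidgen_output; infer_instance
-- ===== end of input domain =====

-- B folds the priority selection into the parsing pass (rank sentinel + best pair) instead of
-- building a provider->path dict and scanning the priority list afterwards; same return values.


-- the fixed priority list shared by both programs
def pvOrder : List String := ["kling", "luma", "minimax", "runway"]

-- Python truthiness of `cur : str | None`: truthy iff some non-empty string
def pvTruthy (cur : Option String) : Bool :=
  match cur with
  | none => false
  | some s => s ≠ ""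

-- line.split(":", 1)[0]  (sep ≠ "" so splitMax? is some; split is never empty so [0] is its head)
def pvHeadSplit (line sep : String) : String :=
  ((PySem.Str.splitMax? line sep 1).getD []).headD ""

-- line.split("file:", 1)[1]  (guarded by `"file:" in line`, so the list has 2 elements)
def pvTailSplit (line sep : String) : String :=
  ((PySem.Str.splitMax? line sep 1).getD []).getD 1 ""

-- the `cur` update, identical in both programs
def pvUpdCur (cur : Option String) (line : String) : Option String :=
  if PySem.Str.startswith line "- " && PySem.Str.isIn ":" line then
    some (PySem.Str.lower (PySem.Str.strip (PySem.Str.replace (pvHeadSplit line ":") "-" "")))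
  else cur

-- ===== PORT A =====
def pvStepA (st : PySem.Dict String String × Option String) (line : String) :
    PySem.Dict String String × Option String :=
  let cur := pvUpdCur st.2 line
  let found :=
    if PySem.Str.isIn "file:" line && pvTruthy cur then
      st.1.insert (cur.getD "") (PySem.Str.strip (pvTailSplit line "file:"))
    else st.1
  (found, cur)

-- the second loop: `for p in order: if p in found: return p, found[p]`
def pvPickA (order : List String) (found : PySem.Dict String String) :
    Option String × Option String :=
  match order with
  | [] => (none, none)
  | p :: rest => if found.contains p then (some p, some (found.getD p "")) else pvPickA rest found

def pick_video_from_vidgen_output (stdout : String) : Option String × Option String :=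
  let st := (PySem.Str.splitlines stdout).foldl pvStepA (PySem.Dict.empty, none)
  pvPickA pvOrder st.1

-- ===== PORT B =====
def pvStepB (st : Nat × (Option String × Option String) × Option String) (line : String) :
    Nat × (Option String × Option String) × Option String :=
  let cur := pvUpdCur st.2.2 line
  let bb :=
    if PySem.Str.isIn "file:" line && pvTruthy cur && decide ((cur.getD "") ∈ pvOrder) then
      let rank := (PySem.List.index? pvOrder (cur.getD "")).getD 0
      if rank ≤ st.1 then
        (rank, (some (cur.getD ""), some (PySem.Str.strip (pvTailSplit line "file:"))))
      else (st.1, st.2.1)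
    else (st.1, st.2.1)
  (bb.1, bb.2, cur)

def pick_video_from_vidgen_output_alt (stdout : String) : Option String × Option String :=
  let st := (PySem.Str.splitlines stdout).foldl pvStepB (pvOrder.length, (none, none), none)
  st.2.1

-- ===== PRECONDITION & SPEC =====
def Spec_pick_video_from_vidgen_output (stdout : String) (out : Option String × Option String) : Prop := out = pick_video_from_vidgen_output_alt stdout
instance (stdout : String) (out : Option String × Option String) : Decidable (Spec_pick_video_from_vidgen_output stdout out) := by unfold Spec_pick_video_from_vidgen_output; infer_instance

-- ===== CLAIM (what is proved, stated in full; the proofs are below) =====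
def Claim_equal_pick_video_from_vidgen_output : Prop := ∀ (stdout : String), Dom_pick_video_from_vidgen_output stdout → Spec_pick_video_from_vidgen_output stdout (pick_video_from_vidgen_output stdout)

-- ===== LEMMAS AND PROOFS =====

-- rank of the first provider of `order` present in `found` (|order| when none is)
def pvRank (order : List String) (found : PySem.Dict String String) : Nat :=
  match order with
  | [] => 0
  | p :: rest => if found.contains p then 0 else 1 + pvRank rest found

-- the index `order.index c` in `List.idxOf?` form (simp's normal form for PySem.List.index?)
def pvIdx (l : List String) (c : String) : Nat := (List.idxOf? c l).getD 0

lemma pvIdx_cons_self (c : String) (rest : List String) : pvIdx (c :: rest) c = 0 := by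
  simp [pvIdx, List.idxOf?, List.findIdx?_cons]

lemma pvIdx_cons_ne (c p : String) (rest : List String) (hpc : p ≠ c) (hm : c ∈ rest) :
    pvIdx (p :: rest) c = 1 + pvIdx rest c := by
  have hs : (List.idxOf? c rest).isSome := by
    rw [List.isSome_idxOf?]; exact hm
  rcases Option.isSome_iff_exists.mp hs with ⟨k, hk⟩
  have hk' : List.findIdx? (· == c) rest = some k := by simpa [List.idxOf?] using hk
  simp [pvIdx, List.idxOf?, List.findIdx?_cons, hpc, hk']
  omega

lemma insert_notmem (l : List String) (found : PySem.Dict String String) (c path : String)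
    (h : c ∉ l) :
    pvPickA l (found.insert c path) = pvPickA l found ∧
    pvRank l (found.insert c path) = pvRank l found := by
  induction l with
  | nil => simp [pvPickA, pvRank]
  | cons p rest ih =>
    have hpc : p ≠ c := by intro e; exact h (e ▸ List.mem_cons_self)
    have hc : (found.insert c path).contains p = found.contains p := by
      simp [PySem.Dict.contains_insert, hpc]
    have hd : (found.insert c path).getD p "" = found.getD p "" := by
      simp [PySem.Dict.getD_insert, hpc]
    have ih' := ih (fun hm => h (List.mem_cons_of_mem _ hm))
    by_cases hf : found.contains p = true <;>
      simp [pvPickA, pvRank, hc, hd, hf, ih'.1, ih'.2]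

lemma insert_mem (l : List String) (found : PySem.Dict String String) (c path : String)
    (h : c ∈ l) :
    pvRank l (found.insert c path) = min (pvIdx l c) (pvRank l found) ∧
    pvPickA l (found.insert c path) =
      (if pvIdx l c ≤ pvRank l found then (some c, some path) else pvPickA l found) := by
  induction l with
  | nil => cases h
  | cons p rest ih =>
    by_cases hpc : p = c
    · subst hpc
      have hc : (found.insert p path).contains p = true := by simp
      have hd : (found.insert p path).getD p "" = path := by simp
      refine ⟨?_, ?_⟩
      · simp [pvRank, hc, pvIdx_cons_self]
      · simp [pvPickA, hc, hd, pvIdx_cons_self]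
    · have hcr : c ∈ rest := by
        rcases List.mem_cons.mp h with e | hm
        · exact absurd e.symm hpc
        · exact hm
      have hc : (found.insert c path).contains p = found.contains p := by
        simp [PySem.Dict.contains_insert, hpc]
      have hd : (found.insert c path).getD p "" = found.getD p "" := by
        simp [PySem.Dict.getD_insert, hpc]
      have ih' := ih hcr
      have hidx := pvIdx_cons_ne c p rest hpc hcr
      by_cases hf : found.contains p = true
      · refine ⟨?_, ?_⟩
        · simp [pvRank, hc, hf, hidx]
        · simp [pvPickA, pvRank, hc, hd, hf, hidx]
      · refine ⟨?_, ?_⟩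
        · simp [pvRank, hc, hf, hidx, ih'.1]
        · simp only [pvPickA, pvRank, hc, hd, hf, Bool.false_eq_true, if_false, ih'.2, hidx,
            Nat.add_le_add_iff_left]

-- the fold invariant tying A's state to B's state
def pvInv (a : PySem.Dict String String × Option String)
    (b : Nat × (Option String × Option String) × Option String) : Prop :=
  a.2 = b.2.2 ∧ b.1 = pvRank pvOrder a.1 ∧ b.2.1 = pvPickA pvOrder a.1

lemma pvInv_step (a : PySem.Dict String String × Option String)
    (b : Nat × (Option String × Option String) × Option String) (line : String)
    (h : pvInv a b) : pvInv (pvStepA a line) (pvStepB b line) := by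
  obtain ⟨hcur, hrank, hbest⟩ := h
  have hcu : pvUpdCur b.2.2 line = pvUpdCur a.2 line := by rw [hcur]
  set cur := pvUpdCur a.2 line with hcurdef
  have hc1 : (pvStepA a line).2 = (pvStepB b line).2.2 := by
    simp [pvStepA, pvStepB, hcu, ← hcurdef]
  by_cases hf : PySem.Chars.isIn ['f', 'i', 'l', 'e', ':'] line.toList = true
  · by_cases ht : pvTruthy cur = true
    · by_cases hm : (cur.getD "") ∈ pvOrder
      · have key := insert_mem pvOrder a.1 (cur.getD "")
          (PySem.Str.strip (pvTailSplit line "file:")) hm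
        simp only [pvIdx] at key
        by_cases hle : (List.idxOf? (cur.getD "") pvOrder).getD 0 ≤ pvRank pvOrder a.1
        · refine ⟨hc1, ?_, ?_⟩ <;>
            simp [pvStepA, pvStepB, hcu, ← hcurdef, hf, ht, hm, hrank, hle,
              key.1, key.2]
        · refine ⟨hc1, ?_, ?_⟩ <;>
            simp [pvStepA, pvStepB, hcu, ← hcurdef, hf, ht, hm, hrank, hbest, hle,
              key.1, key.2]
          omega
      · have key := insert_notmem pvOrder a.1 (cur.getD "")
          (PySem.Str.strip (pvTailSplit line "file:")) hm
        refine ⟨hc1, ?_, ?_⟩ <;>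
          simp [pvStepA, pvStepB, hcu, ← hcurdef, hf, ht, hm, hrank, hbest, key.1, key.2]
    · refine ⟨hc1, ?_, ?_⟩ <;>
        simp [pvStepA, pvStepB, hcu, ← hcurdef, hf, ht, hrank, hbest]
  · refine ⟨hc1, ?_, ?_⟩ <;>
      simp [pvStepA, pvStepB, hcu, ← hcurdef, hf, hrank, hbest]

lemma pvInv_foldl (lines : List String)
    (a : PySem.Dict String String × Option String)
    (b : Nat × (Option String × Option String) × Option String)
    (h : pvInv a b) : pvInv (lines.foldl pvStepA a) (lines.foldl pvStepB b) := by
  induction lines generalizing a b with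
  | nil => exact h
  | cons l rest ih => exact ih _ _ (pvInv_step a b l h)

-- ===== VERDICT (by name: the statement is the Claim_ definition above) =====
theorem pick_video_from_vidgen_output_spec : Claim_equal_pick_video_from_vidgen_output := by
  intro stdout _
  unfold Spec_pick_video_from_vidgen_output
  unfold pick_video_from_vidgen_output pick_video_from_vidgen_output_alt
  have h0 : pvInv (PySem.Dict.empty, none) (pvOrder.length, (none, none), none) := by
    refine ⟨rfl, ?_, ?_⟩ <;> simp [pvOrder, pvRank, pvPickA, PySem.Dict.contains_empty]
  have h := pvInv_foldl (PySem.Str.splitlines stdout) _ _ h0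
  exact h.2.2.symm
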